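-- pv_equiv track=rewrite | github.com/wherby/code | contest/meta2025/r2/q4/q4 copy.py | count_k_weak
-- ===== SOURCE A (Python) =====
-- from functools import cache
--
-- MOD = 998244353
--
-- def count_k_weak(L, R, K):
--
--     def count_non_weak(limit):
--         if limit < 0:
--             return 0
--
--         digits = list(map(int, str(limit)))
--         n = len(digits)
--
--         if n >= K:
--             return count_fixed_length_up_to(K - 1)
--
--
--         @cache
--         def dp(pos, sum_mod, mask, tight, started):
--             if pos == n:
--                 return 1 if started else 0
--
--             res = 0
--             upper = digits[pos] if tight else 9
--
--             for dig in range(upper + 1):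
--                 new_tight = tight and (dig == upper)
--
--                 if not started:
--                     if dig == 0:
--                         res += dp(pos + 1, 0, mask, new_tight, False)
--                     else:
--                         new_mask = 1 | (1 << dig)
--                         res += dp(pos + 1, dig, new_mask, new_tight, True)
--                 else:
--                     new_sum = (sum_mod + dig) % K
--                     if mask & (1 << new_sum):
--                         continue
--                     new_mask = mask | (1 << new_sum)
--                     res += dp(pos + 1, new_sum, new_mask, new_tight, True)
--
--             return res % MOD
--
--         return dp(0, 0, 1, True, False)
--
--     def count_fixed_length_up_to(max_len):
--         total = 0
--         for length in range(1, min(max_len + 1, K)):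
--             total = (total + count_fixed_length(length)) % MOD
--         return total
--
--     def count_fixed_length(length):
--         from functools import lru_cache
--
--         @lru_cache(maxsize=None)
--         def dfs(pos, sum_mod, mask):
--             if pos == length:
--                 return 1
--
--             res = 0
--             start_digit = 1 if pos == 0 else 0
--
--             for dig in range(start_digit, 10):
--                 new_sum = (sum_mod + dig) % K
--                 if mask & (1 << new_sum):
--                     continue
--                 res += dfs(pos + 1, new_sum, mask | (1 << new_sum))
--
--             return res % MOD
--
--         return dfs(0, 0, 1)
--
--     total = (R - L + 1) % MOD
--     non_weak = (count_non_weak(R) - count_non_weak(L - 1)) % MOD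
--     return (total - non_weak) % MOD
-- ===== SOURCE B (Python) =====
-- MOD = 998244353
--
-- def count_k_weak(L, R, K):
--     # Forward (bottom-up) digit DP: sweep the digits of the limit left to right,
--     # carrying a frontier dict (sum_mod, mask) -> count of started strictly-below
--     # prefixes, a zero-prefix counter and the single tight prefix; no recursion.
--
--     def step(F):
--         # advance every started strictly-below prefix by one arbitrary digit
--         NF = {}
--         for (s, m), c in F.items():
--             for d in range(10):
--                 ns = (s + d) % K
--                 b = 1 << ns
--                 if m & b:
--                     continue
--                 key = (ns, m | b)
--                 NF[key] = NF.get(key, 0) + c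
--         return NF
--
--     def non_weak(limit):
--         if limit < 0:
--             return 0
--         digits = [int(c) for c in str(limit)]
--         n = len(digits)
--         if n >= K:
--             # here K <= n, so at most n - 1 lengths: sweep lengths 1..K-1 at once
--             total = 0
--             F = {}
--             for length in range(1, K):
--                 if length == 1:
--                     for d in range(1, 10):
--                         s = d % K
--                         if s != 0:
--                             key = (s, 1 | (1 << s))
--                             F[key] = F.get(key, 0) + 1
--                 else:
--                     F = step(F)
--                 total += sum(F.values())
--             return total % MOD
--         F = {}
--         Z = 0                      # number of all-zero strictly-below prefixes
--         alive, ts, tm, tstarted = True, 0, 1, False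
--         for d0 in digits:
--             F = step(F)
--             for d in range(1, 10):  # zero prefixes start with a nonzero digit
--                 key = (d, 1 | (1 << d))
--                 F[key] = F.get(key, 0) + Z
--             if alive:               # branch the tight prefix below its digit
--                 for d in range(d0):
--                     if not tstarted:
--                         if d == 0:
--                             Z += 1
--                         else:
--                             key = (d, 1 | (1 << d))
--                             F[key] = F.get(key, 0) + 1
--                     else:
--                         ns = (ts + d) % K
--                         b = 1 << ns
--                         if tm & b:
--                             continue
--                         key = (ns, tm | b)
--                         F[key] = F.get(key, 0) + 1
--                 if not tstarted:
--                     if d0 != 0: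
--                         tstarted, ts, tm = True, d0, 1 | (1 << d0)
--                 else:
--                     ns = (ts + d0) % K
--                     b = 1 << ns
--                     if tm & b:
--                         alive = False
--                     else:
--                         ts, tm = ns, tm | b
--         return (sum(F.values()) + (1 if alive and tstarted else 0)) % MOD
--
--     total = (R - L + 1) % MOD
--     nw = (non_weak(R) - non_weak(L - 1)) % MOD
--     return (total - nw) % MOD
-- ===== Notes on version B (the rewrite author's own statement) =====
-- stated objective: alternative
-- what changed: A's memoized top-down recursions (a @cache dp over (pos,sum,mask,tight,started) plus a per-length lru_cache dfs helper) are replaced by a bottom-up forward sweep: one left-to-right pass over the limit's digits carrying a frontier dictionary (sum_mod,mask)->count of strictly-below started prefixes, a zero-prefix counter and the single tight prefix, with the fixed-length branch swept for all lengths at once by repeatedly stepping the same frontier; trade-off: same state space but interpreted dict updates, so a larger constant factor than functools.cache's C-level hits.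
import Mathlib
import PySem

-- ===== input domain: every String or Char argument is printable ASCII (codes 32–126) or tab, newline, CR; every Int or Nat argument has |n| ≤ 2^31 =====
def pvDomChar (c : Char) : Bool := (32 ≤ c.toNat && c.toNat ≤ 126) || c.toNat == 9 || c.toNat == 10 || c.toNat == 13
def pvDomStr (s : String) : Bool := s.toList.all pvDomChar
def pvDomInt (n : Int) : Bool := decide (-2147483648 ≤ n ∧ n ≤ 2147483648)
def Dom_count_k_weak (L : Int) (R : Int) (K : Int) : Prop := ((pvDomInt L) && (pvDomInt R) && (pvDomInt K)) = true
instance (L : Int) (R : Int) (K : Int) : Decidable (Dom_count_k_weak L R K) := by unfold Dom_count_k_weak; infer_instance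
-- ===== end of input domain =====

-- B replaces A's memoized top-down digit DP (a @cache five-argument recursion plus
-- per-length fixed-length helpers) by a bottom-up forward sweep over the digits
-- carrying a frontier dictionary of states; objective: alternative (same asymptotic
-- cost; A's cached recursion has the smaller constant factor on large inputs).

def pvMOD : Int := 998244353

-- digits of str(limit): exact for the digit characters '0'..'9', which str of a
-- nonnegative int (the only case reaching it) produces
def pvDigits (limit : Int) : List Int :=
  (PySem.Int.toStr limit).toList.map (fun c => ((c.toNat - 48 : Nat) : Int))

-- ===== PORT A =====
-- functools.cache is ported as an explicit memo table threaded through the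
-- recursion (Python: dict keyed by the call arguments; the suffix digits[pos:]
-- stands for pos, a bijection within one dp run)
abbrev pvMemoA := Std.HashMap (List Int × Int × Int × Bool × Bool) Int

-- the body of dp's `for dig in range(upper + 1)` loop (rec = dp at pos + 1);
-- 1 << x is (1 : Int) <<< x.toNat (x ≥ 0 at every use)
def pvDpAStepM (K upper sum mask : Int) (tight started : Bool)
    (rec : Int → Int → Bool → Bool → pvMemoA → Int × pvMemoA)
    (p : Int × pvMemoA) (dig : Int) : Int × pvMemoA :=
  let newTight := tight && (dig == upper)
  if !started then
    if dig == 0 then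
      let q := rec 0 mask newTight false p.2
      (p.1 + q.1, q.2)
    else
      let q := rec dig (PySem.Int.bor 1 ((1 : Int) <<< dig.toNat)) newTight true p.2
      (p.1 + q.1, q.2)
  else
    let ns := PySem.Int.mod (sum + dig) K
    if PySem.Int.band mask ((1 : Int) <<< ns.toNat) ≠ 0 then p
    else
      let q := rec ns (PySem.Int.bor mask ((1 : Int) <<< ns.toNat)) newTight true p.2
      (p.1 + q.1, q.2)

-- A's @cache dp(pos, sum_mod, mask, tight, started), recursing on the remaining
-- digit list (pos ↦ the suffix digits[pos:])
def pvDpAM (K : Int) : List Int → Int → Int → Bool → Bool → pvMemoA → Int × pvMemoA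
  | tl, sum, mask, tight, started, memo =>
    match memo[(tl, sum, mask, tight, started)]? with
    | some v => (v, memo)
    | none =>
      let r : Int × pvMemoA :=
        match tl with
        | [] => (if started then 1 else 0, memo)
        | _d0 :: tl' =>
          let upper : Int := if tight then _d0 else 9
          let p := (PySem.List.pyRange 0 (upper + 1) 1).foldl
            (pvDpAStepM K upper sum mask tight started
              (fun a b c d mm => pvDpAM K tl' a b c d mm)) (0, memo)
          (PySem.Int.mod p.1 pvMOD, p.2)
      (r.1, r.2.insert (tl, sum, mask, tight, started) r.1)

-- dp's value (the cache is fresh per count_non_weak call, as in A)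
def pvDpA (K : Int) (tl : List Int) (sum mask : Int) (tight started : Bool) : Int :=
  (pvDpAM K tl sum mask tight started ∅).1

abbrev pvMemoD := Std.HashMap (Nat × Int × Int × Bool) Int

-- the body of dfs's `for dig in range(start_digit, 10)` loop
def pvDfsAStepM (K sum mask : Int) (rec : Int → Int → pvMemoD → Int × pvMemoD)
    (p : Int × pvMemoD) (dig : Int) : Int × pvMemoD :=
  let ns := PySem.Int.mod (sum + dig) K
  if PySem.Int.band mask ((1 : Int) <<< ns.toNat) ≠ 0 then p
  else
    let q := rec ns (PySem.Int.bor mask ((1 : Int) <<< ns.toNat)) p.2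
    (p.1 + q.1, q.2)

-- A's lru_cache dfs(pos, sum_mod, mask) of count_fixed_length, recursing on
-- length - pos; isStart is pos == 0 (it only selects start_digit)
def pvDfsAM (K : Int) : Nat → Int → Int → Bool → pvMemoD → Int × pvMemoD
  | rem, sum, mask, isStart, memo =>
    match memo[(rem, sum, mask, isStart)]? with
    | some v => (v, memo)
    | none =>
      let r : Int × pvMemoD :=
        match rem with
        | 0 => (1, memo)
        | rem' + 1 =>
          let startDigit : Int := if isStart then 1 else 0
          let p := (PySem.List.pyRange startDigit 10 1).foldl
            (pvDfsAStepM K sum mask (fun a b mm => pvDfsAM K rem' a b false mm)) (0, memo)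
          (PySem.Int.mod p.1 pvMOD, p.2)
      (r.1, r.2.insert (rem, sum, mask, isStart) r.1)

-- dfs's value (the cache is fresh per count_fixed_length call, as in A)
def pvDfsA (K : Int) (rem : Nat) (sum mask : Int) (isStart : Bool) : Int :=
  (pvDfsAM K rem sum mask isStart ∅).1

-- count_fixed_length(length); length ≥ 1 at every call site, so .toNat is exact
def pvCflA (K len : Int) : Int := pvDfsA K len.toNat 0 1 true

def pvCflUpToA (K maxLen : Int) : Int :=
  (PySem.List.pyRange 1 (min (maxLen + 1) K) 1).foldl
    (fun total len => PySem.Int.mod (total + pvCflA K len) pvMOD) 0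

def pvNonWeakA (K limit : Int) : Int :=
  if limit < 0 then 0
  else
    let digits := pvDigits limit
    let n := digits.length
    if (n : Int) ≥ K then pvCflUpToA K (K - 1)
    else pvDpA K digits 0 1 true false

def count_k_weak (L : Int) (R : Int) (K : Int) : Int :=
  let total := PySem.Int.mod (R - L + 1) pvMOD
  let nonweak := PySem.Int.mod (pvNonWeakA K R - pvNonWeakA K (L - 1)) pvMOD
  PySem.Int.mod (total - nonweak) pvMOD

-- ===== PORT B =====
-- Source B's frontier dict (sum_mod, mask) -> count
abbrev pvFr := PySem.Dict (Int × Int) Int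

-- step(F) of Source B: advance every started strictly-below prefix by one digit
def pvStepB (K : Int) (F : pvFr) : pvFr :=
  F.items.foldl (fun NF p =>
    (PySem.List.pyRange 0 10 1).foldl (fun NF d =>
      let ns := PySem.Int.mod (p.1.1 + d) K
      let b := (1 : Int) <<< ns.toNat
      if PySem.Int.band p.1.2 b ≠ 0 then NF
      else
        let key := (ns, PySem.Int.bor p.1.2 b)
        NF.insert key (NF.getD key 0 + p.2)) NF) PySem.Dict.empty

-- the body of Source B's `for length in range(1, K)` loop (state: total, F)
def pvFixBodyB (K : Int) (tF : Int × pvFr) (length : Int) : Int × pvFr :=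
  let F := if length == 1 then
      (PySem.List.pyRange 1 10 1).foldl (fun F d =>
        let s := PySem.Int.mod d K
        if s ≠ 0 then
          let key := (s, PySem.Int.bor 1 ((1 : Int) <<< s.toNat))
          F.insert key (F.getD key 0 + 1)
        else F) tF.2
    else pvStepB K tF.2
  (tF.1 + F.values.sum, F)

-- the n >= K branch of non_weak: sweep all lengths 1..K-1 at once
def pvFixedSweepB (K : Int) : Int :=
  PySem.Int.mod ((PySem.List.pyRange 1 K 1).foldl (pvFixBodyB K) (0, PySem.Dict.empty)).1 pvMOD

-- the body of Source B's `for d in range(d0)` tight-branch loop (state: F, Z)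
def pvTightBranchB (K ts tm : Int) (tstarted : Bool) (st : pvFr × Int) (d : Int) : pvFr × Int :=
  if !tstarted then
    if d == 0 then (st.1, st.2 + 1)
    else
      let key := (d, PySem.Int.bor 1 ((1 : Int) <<< d.toNat))
      (st.1.insert key (st.1.getD key 0 + 1), st.2)
  else
    let ns := PySem.Int.mod (ts + d) K
    let b := (1 : Int) <<< ns.toNat
    if PySem.Int.band tm b ≠ 0 then st
    else
      let key := (ns, PySem.Int.bor tm b)
      (st.1.insert key (st.1.getD key 0 + 1), st.2)

-- the body of Source B's `for d0 in digits` sweep (state: F, Z, alive, ts, tm, tstarted)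
def pvSweepBodyB (K : Int) (st : pvFr × Int × Bool × Int × Int × Bool) (d0 : Int) :
    pvFr × Int × Bool × Int × Int × Bool :=
  let F := pvStepB K st.1
  let Z := st.2.1
  let F := (PySem.List.pyRange 1 10 1).foldl (fun F d =>
      let key := (d, PySem.Int.bor 1 ((1 : Int) <<< d.toNat))
      F.insert key (F.getD key 0 + Z)) F
  let alive := st.2.2.1
  let ts := st.2.2.2.1
  let tm := st.2.2.2.2.1
  let tstarted := st.2.2.2.2.2
  if alive then
    let FZ := (PySem.List.pyRange 0 d0 1).foldl (pvTightBranchB K ts tm tstarted) (F, Z)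
    if !tstarted then
      if d0 != 0 then (FZ.1, FZ.2, true, d0, PySem.Int.bor 1 ((1 : Int) <<< d0.toNat), true)
      else (FZ.1, FZ.2, true, ts, tm, false)
    else
      let ns := PySem.Int.mod (ts + d0) K
      let b := (1 : Int) <<< ns.toNat
      if PySem.Int.band tm b ≠ 0 then (FZ.1, FZ.2, false, ts, tm, tstarted)
      else (FZ.1, FZ.2, true, ns, PySem.Int.bor tm b, true)
  else (F, Z, alive, ts, tm, tstarted)

-- the n < K branch of non_weak
def pvSweepB (K : Int) (digits : List Int) : Int :=
  let fin := digits.foldl (pvSweepBodyB K) (PySem.Dict.empty, 0, true, 0, 1, false)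
  PySem.Int.mod (fin.1.values.sum + (if fin.2.2.1 && fin.2.2.2.2.2 then 1 else 0)) pvMOD

def pvNonWeakB (K limit : Int) : Int :=
  if limit < 0 then 0
  else
    let digits := pvDigits limit
    if (digits.length : Int) ≥ K then pvFixedSweepB K
    else pvSweepB K digits

def count_k_weak_alt (L : Int) (R : Int) (K : Int) : Int :=
  let total := PySem.Int.mod (R - L + 1) pvMOD
  let nw := PySem.Int.mod (pvNonWeakB K R - pvNonWeakB K (L - 1)) pvMOD
  PySem.Int.mod (total - nw) pvMOD

-- ===== PRECONDITION & SPEC =====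
def Spec_count_k_weak (L : Int) (R : Int) (K : Int) (out : Int) : Prop := out = count_k_weak_alt L R K
instance (L : Int) (R : Int) (K : Int) (out : Int) : Decidable (Spec_count_k_weak L R K out) := by unfold Spec_count_k_weak; infer_instance

-- ===== CLAIM (what is proved, stated in full; the proofs are below) =====
def Claim_equal_count_k_weak : Prop := ∀ (L : Int) (R : Int) (K : Int), Dom_count_k_weak L R K → Spec_count_k_weak L R K (count_k_weak L R K)

-- ===== LEMMAS AND PROOFS =====

-- ghost (proof-only) plain versions of A's two memoized recursions, and the
-- proof that memoization is sound (every cached value is the plain value)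

def pvDpAStep (K upper sum mask : Int) (tight started : Bool)
    (rec : Int → Int → Bool → Bool → Int) (res dig : Int) : Int :=
  let newTight := tight && (dig == upper)
  if !started then
    if dig == 0 then res + rec 0 mask newTight false
    else res + rec dig (PySem.Int.bor 1 ((1 : Int) <<< dig.toNat)) newTight true
  else
    let ns := PySem.Int.mod (sum + dig) K
    if PySem.Int.band mask ((1 : Int) <<< ns.toNat) ≠ 0 then res
    else res + rec ns (PySem.Int.bor mask ((1 : Int) <<< ns.toNat)) newTight true

def pvDpAP (K : Int) : List Int → Int → Int → Bool → Bool → Int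
  | [], _, _, _, started => if started then 1 else 0
  | _d0 :: tl, sum, mask, tight, started =>
    let upper : Int := if tight then _d0 else 9
    PySem.Int.mod ((PySem.List.pyRange 0 (upper + 1) 1).foldl
      (pvDpAStep K upper sum mask tight started (fun a b c d => pvDpAP K tl a b c d)) 0) pvMOD

def pvDfsAStep (K sum mask : Int) (rec : Int → Int → Int) (res dig : Int) : Int :=
  let ns := PySem.Int.mod (sum + dig) K
  if PySem.Int.band mask ((1 : Int) <<< ns.toNat) ≠ 0 then res
  else res + rec ns (PySem.Int.bor mask ((1 : Int) <<< ns.toNat))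

def pvDfsAP (K : Int) : Nat → Int → Int → Bool → Int
  | 0, _, _, _ => 1
  | rem + 1, sum, mask, isStart =>
    let startDigit : Int := if isStart then 1 else 0
    PySem.Int.mod ((PySem.List.pyRange startDigit 10 1).foldl
      (pvDfsAStep K sum mask (fun a b => pvDfsAP K rem a b false)) 0) pvMOD

def pvValidD (K : Int) (memo : pvMemoD) : Prop :=
  ∀ (rem : Nat) (s mask : Int) (isStart : Bool) (v : Int),
    memo[(rem, s, mask, isStart)]? = some v → v = pvDfsAP K rem s mask isStart

theorem pvValidD_empty (K : Int) : pvValidD K ∅ := by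
  intro rem s mask isStart v h
  rw [Std.HashMap.getElem?_empty] at h
  exact absurd h (by simp)

theorem pvValidD_insert (K : Int) (memo : pvMemoD) (h : pvValidD K memo)
    (rem : Nat) (s mask : Int) (isStart : Bool) :
    pvValidD K (memo.insert (rem, s, mask, isStart) (pvDfsAP K rem s mask isStart)) := by
  intro rem' s' mask' isStart' v hv
  rw [Std.HashMap.getElem?_insert] at hv
  by_cases hk : ((rem, s, mask, isStart) == (rem', s', mask', isStart')) = true
  · rw [if_pos hk] at hv
    obtain ⟨rfl, rfl, rfl, rfl⟩ : rem = rem' ∧ s = s' ∧ mask = mask' ∧ isStart = isStart' := by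
      simpa [Prod.ext_iff] using eq_of_beq hk
    exact (Option.some_inj.mp hv).symm
  · rw [if_neg hk] at hv
    exact h rem' s' mask' isStart' v hv

theorem pvDfsAM_sound (K : Int) : ∀ (rem : Nat) (s mask : Int) (isStart : Bool) (memo : pvMemoD),
    pvValidD K memo →
    (pvDfsAM K rem s mask isStart memo).1 = pvDfsAP K rem s mask isStart
      ∧ pvValidD K (pvDfsAM K rem s mask isStart memo).2 := by
  intro rem
  induction rem with
  | zero =>
    intro s mask isStart memo hval
    rw [pvDfsAM]
    cases hlook : memo[((0 : Nat), s, mask, isStart)]? with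
    | some v => exact ⟨hval 0 s mask isStart v hlook, by simpa using hval⟩
    | none =>
      refine ⟨by simp [pvDfsAP], ?_⟩
      simpa [pvDfsAP] using pvValidD_insert K memo hval 0 s mask isStart
  | succ rem' ih =>
    intro s mask isStart memo hval
    rw [pvDfsAM]
    cases hlook : memo[((rem' + 1 : Nat), s, mask, isStart)]? with
    | some v => exact ⟨hval _ _ _ _ v hlook, by simpa using hval⟩
    | none =>
      have hfold : ∀ (l : List Int) (acc : Int) (mm : pvMemoD), pvValidD K mm →
          (l.foldl (pvDfsAStepM K s mask (fun a b m2 => pvDfsAM K rem' a b false m2)) (acc, mm)).1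
            = l.foldl (pvDfsAStep K s mask (fun a b => pvDfsAP K rem' a b false)) acc
          ∧ pvValidD K
              (l.foldl (pvDfsAStepM K s mask (fun a b m2 => pvDfsAM K rem' a b false m2)) (acc, mm)).2 := by
        intro l
        induction l with
        | nil => exact fun acc mm h => ⟨rfl, h⟩
        | cons d l ihl =>
          intro acc mm h
          simp only [List.foldl_cons]
          by_cases hb : PySem.Int.band mask ((1 : Int) <<< (PySem.Int.mod (s + d) K).toNat) ≠ 0
          · rw [show pvDfsAStepM K s mask (fun a b m2 => pvDfsAM K rem' a b false m2) (acc, mm) d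
                  = (acc, mm) from by simp [pvDfsAStepM, hb],
              show pvDfsAStep K s mask (fun a b => pvDfsAP K rem' a b false) acc d = acc from by
                simp [pvDfsAStep, hb]]
            exact ihl acc mm h
          · obtain ⟨hv1, hv2⟩ := ih (PySem.Int.mod (s + d) K)
              (PySem.Int.bor mask ((1 : Int) <<< (PySem.Int.mod (s + d) K).toNat)) false mm h
            rw [show pvDfsAStepM K s mask (fun a b m2 => pvDfsAM K rem' a b false m2) (acc, mm) d
                  = (acc + (pvDfsAM K rem' (PySem.Int.mod (s + d) K)
                      (PySem.Int.bor mask ((1 : Int) <<< (PySem.Int.mod (s + d) K).toNat)) false mm).1,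
                     (pvDfsAM K rem' (PySem.Int.mod (s + d) K)
                      (PySem.Int.bor mask ((1 : Int) <<< (PySem.Int.mod (s + d) K).toNat)) false mm).2) from by
                simp [pvDfsAStepM, hb],
              show pvDfsAStep K s mask (fun a b => pvDfsAP K rem' a b false) acc d
                  = acc + pvDfsAP K rem' (PySem.Int.mod (s + d) K)
                      (PySem.Int.bor mask ((1 : Int) <<< (PySem.Int.mod (s + d) K).toNat)) false from by
                simp [pvDfsAStep, hb],
              hv1]
            exact ihl _ _ hv2
      obtain ⟨h1, h2⟩ := hfold (PySem.List.pyRange (if isStart then 1 else 0) 10 1) 0 memo hval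
      constructor
      · simp only [h1, pvDfsAP]
      · have hins := pvValidD_insert K _ h2 (rem' + 1) s mask isStart
        rw [show pvDfsAP K (rem' + 1) s mask isStart = PySem.Int.mod
            ((PySem.List.pyRange (if isStart then 1 else 0) 10 1).foldl
              (pvDfsAStep K s mask (fun a b => pvDfsAP K rem' a b false)) 0) pvMOD
          from rfl, ← h1] at hins
        simpa using hins

theorem pvDfsA_eq (K : Int) (rem : Nat) (s mask : Int) (isStart : Bool) :
    pvDfsA K rem s mask isStart = pvDfsAP K rem s mask isStart :=
  (pvDfsAM_sound K rem s mask isStart ∅ (pvValidD_empty K)).1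

def pvValidA (K : Int) (memo : pvMemoA) : Prop :=
  ∀ (tl : List Int) (s mask : Int) (tight started : Bool) (v : Int),
    memo[(tl, s, mask, tight, started)]? = some v → v = pvDpAP K tl s mask tight started

theorem pvValidA_empty (K : Int) : pvValidA K ∅ := by
  intro tl s mask tight started v h
  rw [Std.HashMap.getElem?_empty] at h
  exact absurd h (by simp)

theorem pvValidA_insert (K : Int) (memo : pvMemoA) (h : pvValidA K memo)
    (tl : List Int) (s mask : Int) (tight started : Bool) :
    pvValidA K (memo.insert (tl, s, mask, tight, started) (pvDpAP K tl s mask tight started)) := by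
  intro tl' s' mask' tight' started' v hv
  rw [Std.HashMap.getElem?_insert] at hv
  by_cases hk : ((tl, s, mask, tight, started) == (tl', s', mask', tight', started')) = true
  · rw [if_pos hk] at hv
    obtain ⟨rfl, rfl, rfl, rfl, rfl⟩ :
        tl = tl' ∧ s = s' ∧ mask = mask' ∧ tight = tight' ∧ started = started' := by
      simpa [Prod.ext_iff] using eq_of_beq hk
    exact (Option.some_inj.mp hv).symm
  · rw [if_neg hk] at hv
    exact h tl' s' mask' tight' started' v hv

theorem pvDpAM_sound (K : Int) : ∀ (tl : List Int) (s mask : Int) (tight started : Bool)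
    (memo : pvMemoA), pvValidA K memo →
    (pvDpAM K tl s mask tight started memo).1 = pvDpAP K tl s mask tight started
      ∧ pvValidA K (pvDpAM K tl s mask tight started memo).2 := by
  intro tl
  induction tl with
  | nil =>
    intro s mask tight started memo hval
    rw [pvDpAM]
    cases hlook : memo[(([] : List Int), s, mask, tight, started)]? with
    | some v => exact ⟨hval [] s mask tight started v hlook, by simpa using hval⟩
    | none =>
      refine ⟨by simp [pvDpAP], ?_⟩
      simpa [pvDpAP] using pvValidA_insert K memo hval [] s mask tight started
  | cons d0 tl' ih =>
    intro s mask tight started memo hval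
    rw [pvDpAM]
    cases hlook : memo[((d0 :: tl' : List Int), s, mask, tight, started)]? with
    | some v => exact ⟨hval _ _ _ _ _ v hlook, by simpa using hval⟩
    | none =>
      have hfold : ∀ (l : List Int) (acc : Int) (mm : pvMemoA), pvValidA K mm →
          (l.foldl (pvDpAStepM K (if tight then d0 else 9) s mask tight started
              (fun a b c d m2 => pvDpAM K tl' a b c d m2)) (acc, mm)).1
            = l.foldl (pvDpAStep K (if tight then d0 else 9) s mask tight started
              (fun a b c d => pvDpAP K tl' a b c d)) acc
          ∧ pvValidA K
              (l.foldl (pvDpAStepM K (if tight then d0 else 9) s mask tight started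
                (fun a b c d m2 => pvDpAM K tl' a b c d m2)) (acc, mm)).2 := by
        intro l
        induction l with
        | nil => exact fun acc mm h => ⟨rfl, h⟩
        | cons d l ihl =>
          intro acc mm h
          simp only [List.foldl_cons]
          cases started with
          | false =>
            by_cases hd : d = 0
            · obtain ⟨hv1, hv2⟩ := ih 0 mask (tight && (d == (if tight then d0 else 9))) false mm h
              rw [show pvDpAStepM K (if tight then d0 else 9) s mask tight false
                    (fun a b c d2 m2 => pvDpAM K tl' a b c d2 m2) (acc, mm) d
                    = (acc + (pvDpAM K tl' 0 mask (tight && (d == (if tight then d0 else 9))) false mm).1,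
                       (pvDpAM K tl' 0 mask (tight && (d == (if tight then d0 else 9))) false mm).2) from by
                  simp [pvDpAStepM, hd],
                show pvDpAStep K (if tight then d0 else 9) s mask tight false
                    (fun a b c d2 => pvDpAP K tl' a b c d2) acc d
                    = acc + pvDpAP K tl' 0 mask (tight && (d == (if tight then d0 else 9))) false from by
                  simp [pvDpAStep, hd],
                hv1]
              exact ihl _ _ hv2
            · obtain ⟨hv1, hv2⟩ := ih d (PySem.Int.bor 1 ((1 : Int) <<< d.toNat))
                (tight && (d == (if tight then d0 else 9))) true mm h
              rw [show pvDpAStepM K (if tight then d0 else 9) s mask tight false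
                    (fun a b c d2 m2 => pvDpAM K tl' a b c d2 m2) (acc, mm) d
                    = (acc + (pvDpAM K tl' d (PySem.Int.bor 1 ((1 : Int) <<< d.toNat))
                        (tight && (d == (if tight then d0 else 9))) true mm).1,
                       (pvDpAM K tl' d (PySem.Int.bor 1 ((1 : Int) <<< d.toNat))
                        (tight && (d == (if tight then d0 else 9))) true mm).2) from by
                  simp [pvDpAStepM, hd],
                show pvDpAStep K (if tight then d0 else 9) s mask tight false
                    (fun a b c d2 => pvDpAP K tl' a b c d2) acc d
                    = acc + pvDpAP K tl' d (PySem.Int.bor 1 ((1 : Int) <<< d.toNat))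
                        (tight && (d == (if tight then d0 else 9))) true from by
                  simp [pvDpAStep, hd],
                hv1]
              exact ihl _ _ hv2
          | true =>
            by_cases hb : PySem.Int.band mask ((1 : Int) <<< (PySem.Int.mod (s + d) K).toNat) ≠ 0
            · rw [show pvDpAStepM K (if tight then d0 else 9) s mask tight true
                    (fun a b c d2 m2 => pvDpAM K tl' a b c d2 m2) (acc, mm) d = (acc, mm) from by
                  simp [pvDpAStepM, hb],
                show pvDpAStep K (if tight then d0 else 9) s mask tight true
                    (fun a b c d2 => pvDpAP K tl' a b c d2) acc d = acc from by
                  simp [pvDpAStep, hb]]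
              exact ihl acc mm h
            · obtain ⟨hv1, hv2⟩ := ih (PySem.Int.mod (s + d) K)
                (PySem.Int.bor mask ((1 : Int) <<< (PySem.Int.mod (s + d) K).toNat))
                (tight && (d == (if tight then d0 else 9))) true mm h
              rw [show pvDpAStepM K (if tight then d0 else 9) s mask tight true
                    (fun a b c d2 m2 => pvDpAM K tl' a b c d2 m2) (acc, mm) d
                    = (acc + (pvDpAM K tl' (PySem.Int.mod (s + d) K)
                        (PySem.Int.bor mask ((1 : Int) <<< (PySem.Int.mod (s + d) K).toNat))
                        (tight && (d == (if tight then d0 else 9))) true mm).1,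
                       (pvDpAM K tl' (PySem.Int.mod (s + d) K)
                        (PySem.Int.bor mask ((1 : Int) <<< (PySem.Int.mod (s + d) K).toNat))
                        (tight && (d == (if tight then d0 else 9))) true mm).2) from by
                  simp [pvDpAStepM, hb],
                show pvDpAStep K (if tight then d0 else 9) s mask tight true
                    (fun a b c d2 => pvDpAP K tl' a b c d2) acc d
                    = acc + pvDpAP K tl' (PySem.Int.mod (s + d) K)
                        (PySem.Int.bor mask ((1 : Int) <<< (PySem.Int.mod (s + d) K).toNat))
                        (tight && (d == (if tight then d0 else 9))) true from by
                  simp [pvDpAStep, hb],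
                hv1]
              exact ihl _ _ hv2
      obtain ⟨h1, h2⟩ := hfold (PySem.List.pyRange 0 ((if tight then d0 else 9) + 1) 1) 0 memo hval
      constructor
      · simp only [h1, pvDpAP]
      · have hins := pvValidA_insert K _ h2 (d0 :: tl') s mask tight started
        rw [show pvDpAP K (d0 :: tl') s mask tight started = PySem.Int.mod
            ((PySem.List.pyRange 0 ((if tight then d0 else 9) + 1) 1).foldl
              (pvDpAStep K (if tight then d0 else 9) s mask tight started
                (fun a b c d => pvDpAP K tl' a b c d)) 0) pvMOD
          from rfl, ← h1] at hins
        simpa using hins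

theorem pvDpA_eq (K : Int) (tl : List Int) (s mask : Int) (tight started : Bool) :
    pvDpA K tl s mask tight started = pvDpAP K tl s mask tight started :=
  (pvDpAM_sound K tl s mask tight started ∅ (pvValidA_empty K)).1

-- ghost true (un-modded) counting functions shared by both directions of the proof

def pvCntF (K : Int) : Nat → Int → Int → Int
  | 0, _, _ => 1
  | r + 1, s, m => ((PySem.List.pyRange 0 10 1).map (fun d =>
      if PySem.Int.band m ((1 : Int) <<< (PySem.Int.mod (s + d) K).toNat) ≠ 0 then 0
      else pvCntF K r (PySem.Int.mod (s + d) K)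
        (PySem.Int.bor m ((1 : Int) <<< (PySem.Int.mod (s + d) K).toNat)))).sum

def pvCntZ (K : Int) : Nat → Int
  | 0 => 0
  | r + 1 => pvCntZ K r + ((PySem.List.pyRange 1 10 1).map (fun d =>
      pvCntF K r d (PySem.Int.bor 1 ((1 : Int) <<< d.toNat)))).sum

def pvCntT (K : Int) : List Int → Int → Int → Bool → Int
  | [], _, _, st => if st then 1 else 0
  | d0 :: tl, s, m, st =>
    ((PySem.List.pyRange 0 d0 1).map (fun d =>
      if !st then
        (if d == 0 then pvCntZ K tl.length
         else pvCntF K tl.length d (PySem.Int.bor 1 ((1 : Int) <<< d.toNat)))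
      else
        if PySem.Int.band m ((1 : Int) <<< (PySem.Int.mod (s + d) K).toNat) ≠ 0 then 0
        else pvCntF K tl.length (PySem.Int.mod (s + d) K)
          (PySem.Int.bor m ((1 : Int) <<< (PySem.Int.mod (s + d) K).toNat)))).sum
    + (if !st then
        (if d0 != 0 then pvCntT K tl d0 (PySem.Int.bor 1 ((1 : Int) <<< d0.toNat)) true
         else pvCntT K tl 0 m false)
       else
        if PySem.Int.band m ((1 : Int) <<< (PySem.Int.mod (s + d0) K).toNat) ≠ 0 then 0
        else pvCntT K tl (PySem.Int.mod (s + d0) K)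
          (PySem.Int.bor m ((1 : Int) <<< (PySem.Int.mod (s + d0) K).toNat)) true)

def pvCntFix (K : Int) (r : Nat) : Int :=
  ((PySem.List.pyRange 1 10 1).map (fun d =>
    if PySem.Int.mod d K ≠ 0 then pvCntF K r (PySem.Int.mod d K)
      (PySem.Int.bor 1 ((1 : Int) <<< (PySem.Int.mod d K).toNat)) else 0)).sum

-- modular-arithmetic helpers

theorem pv_mod_emod (x : Int) : PySem.Int.mod x pvMOD = x % pvMOD :=
  PySem.Int.mod_eq_emod_of_pos (by norm_num [pvMOD])

theorem pv_mod_congr {a b : Int} (h : a ≡ b [ZMOD pvMOD]) :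
    PySem.Int.mod a pvMOD = PySem.Int.mod b pvMOD := by
  rw [pv_mod_emod, pv_mod_emod]; exact h

theorem pv_modeq_mod (x : Int) : PySem.Int.mod x pvMOD ≡ x [ZMOD pvMOD] := by
  rw [pv_mod_emod]; exact Int.emod_emod_of_dvd x dvd_rfl

theorem pv_sum_modeq {α : Type} (l : List α) (f g : α → Int)
    (h : ∀ x ∈ l, f x ≡ g x [ZMOD pvMOD]) :
    (l.map f).sum ≡ (l.map g).sum [ZMOD pvMOD] := by
  induction l with
  | nil => rfl
  | cons x l ih =>
    simp only [List.map_cons, List.sum_cons]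
    exact Int.ModEq.add (h x (by simp)) (ih (fun y hy => h y (List.mem_cons_of_mem _ hy)))

theorem pv_mod_mod_add (a x : Int) :
    PySem.Int.mod (PySem.Int.mod x pvMOD + a) pvMOD = PySem.Int.mod (x + a) pvMOD :=
  pv_mod_congr (Int.ModEq.add_right a (pv_modeq_mod x))

-- a mod-accumulating foldl is the mod of the plain sum
theorem pv_modfold {α : Type} (l : List α) (f : α → Int) : ∀ a : Int,
    l.foldl (fun tot x => PySem.Int.mod (tot + f x) pvMOD) (PySem.Int.mod a pvMOD)
      = PySem.Int.mod (a + (l.map f).sum) pvMOD := by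
  induction l with
  | nil => intro a; simp
  | cons x l ih =>
    intro a
    simp only [List.foldl_cons, List.map_cons, List.sum_cons]
    rw [pv_mod_mod_add, ih (a + f x)]
    ring_nf

-- turn a guarded accumulating foldl into a map-sum
theorem pv_foldl_guard_sum {α : Type} (l : List α) (f : α → Int) (a : Int) :
    l.foldl (fun res d => res + f d) a = a + (l.map f).sum := by
  rw [PySem.List.foldl_add]

-- ===== A-side: the plain recursions compute the true counts mod pvMOD =====

theorem pv_dpAP_free (K : Int) : ∀ (tl : List Int) (s m : Int),
    pvDpAP K tl s m false true = PySem.Int.mod (pvCntF K tl.length s m) pvMOD := by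
  intro tl
  induction tl with
  | nil =>
    intro s m
    simp [pvDpAP, pvCntF, pvMOD]
  | cons d0 tl ih =>
    intro s m
    show PySem.Int.mod ((PySem.List.pyRange 0 (9 + 1) 1).foldl
      (pvDpAStep K 9 s m false true (fun a b c d => pvDpAP K tl a b c d)) 0) pvMOD = _
    rw [show ((9 : Int) + 1) = 10 from by norm_num]
    have hbody : ∀ (res d : Int),
        pvDpAStep K 9 s m false true (fun a b c d => pvDpAP K tl a b c d) res d
          = res + (if PySem.Int.band m ((1 : Int) <<< (PySem.Int.mod (s + d) K).toNat) ≠ 0 then 0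
              else pvDpAP K tl (PySem.Int.mod (s + d) K)
                (PySem.Int.bor m ((1 : Int) <<< (PySem.Int.mod (s + d) K).toNat)) false true) := by
      intro res d
      simp only [pvDpAStep, Bool.not_true, Bool.false_eq_true, if_false, Bool.false_and]
      split_ifs <;> simp
    rw [PySem.List.foldl_congr_mem _ _ _ _ (fun res d hd => hbody res d), pv_foldl_guard_sum, zero_add]
    refine pv_mod_congr ?_
    show _ ≡ pvCntF K (tl.length + 1) s m [ZMOD pvMOD]
    rw [pvCntF]
    refine pv_sum_modeq _ _ _ ?_
    intro d _
    by_cases hb : PySem.Int.band m ((1 : Int) <<< (PySem.Int.mod (s + d) K).toNat) ≠ 0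
    · rw [if_pos hb, if_pos hb]
    · rw [if_neg hb, if_neg hb, ih]
      exact pv_modeq_mod _

theorem pv_dpAP_zero (K : Int) : ∀ (tl : List Int) (m : Int),
    pvDpAP K tl 0 m false false = PySem.Int.mod (pvCntZ K tl.length) pvMOD := by
  intro tl
  induction tl with
  | nil =>
    intro m
    simp [pvDpAP, pvCntZ, pvMOD]
  | cons d0 tl ih =>
    intro m
    show PySem.Int.mod ((PySem.List.pyRange 0 (9 + 1) 1).foldl
      (pvDpAStep K 9 0 m false false (fun a b c d => pvDpAP K tl a b c d)) 0) pvMOD = _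
    rw [show ((9 : Int) + 1) = 10 from by norm_num,
        PySem.List.pyRange_one_cons (by norm_num : (0:Int) < 10),
        show ((0 : Int) + 1) = 1 from by norm_num]
    have hbody : ∀ (res : Int), ∀ d ∈ (0 : Int) :: PySem.List.pyRange 1 10 1,
        pvDpAStep K 9 0 m false false (fun a b c d => pvDpAP K tl a b c d) res d
          = res + (if d == 0 then pvDpAP K tl 0 m false false
              else pvDpAP K tl d (PySem.Int.bor 1 ((1 : Int) <<< d.toNat)) false true) := by
      intro res d _
      simp only [pvDpAStep, Bool.not_false, if_true, Bool.false_and]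
      split_ifs <;> simp
    rw [PySem.List.foldl_congr_mem _ _ _ _ hbody, List.foldl_cons, pv_foldl_guard_sum]
    have h00 : ((0 : Int) + if ((0 : Int) == 0) = true then pvDpAP K tl 0 m false false
        else pvDpAP K tl 0 (PySem.Int.bor 1 ((1 : Int) <<< (0 : Int).toNat)) false true)
        = pvDpAP K tl 0 m false false := by norm_num
    rw [h00]
    refine pv_mod_congr ?_
    show _ ≡ pvCntZ K (tl.length + 1) [ZMOD pvMOD]
    rw [show pvCntZ K (tl.length + 1) = pvCntZ K tl.length
        + ((PySem.List.pyRange 1 10 1).map (fun d =>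
            pvCntF K tl.length d (PySem.Int.bor 1 ((1 : Int) <<< d.toNat)))).sum from rfl]
    refine Int.ModEq.add ?_ (pv_sum_modeq _ _ _ ?_)
    · rw [ih]; exact pv_modeq_mod _
    · intro d hd
      have hd1 : (1 : Int) ≤ d := (PySem.List.mem_pyRange_one.mp hd).1
      have hne : (d == 0) = false := by simp; omega
      rw [hne]
      simp only [Bool.false_eq_true, if_false]
      rw [pv_dpAP_free]
      exact pv_modeq_mod _

theorem pv_dpAP_tight (K : Int) : ∀ (tl : List Int), (∀ d ∈ tl, 0 ≤ d) →
    ∀ (s m : Int) (st : Bool),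
    pvDpAP K tl s m true st = PySem.Int.mod (pvCntT K tl s m st) pvMOD := by
  intro tl
  induction tl with
  | nil =>
    intro _ s m st
    cases st <;> simp [pvDpAP, pvCntT, pvMOD]
  | cons d0 tl ih =>
    intro hnn s m st
    have hd0 : (0 : Int) ≤ d0 := hnn d0 (by simp)
    have ihtl := ih (fun d hd => hnn d (List.mem_cons_of_mem _ hd))
    show PySem.Int.mod ((PySem.List.pyRange 0 (d0 + 1) 1).foldl
      (pvDpAStep K d0 s m true st (fun a b c d => pvDpAP K tl a b c d)) 0) pvMOD = _
    rw [PySem.List.pyRange_one_append 0 d0 (d0 + 1) hd0 (by omega),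
        PySem.List.pyRange_one_singleton, List.foldl_append]
    have hbody : ∀ (res : Int), ∀ d ∈ PySem.List.pyRange 0 d0 1,
        pvDpAStep K d0 s m true st (fun a b c d => pvDpAP K tl a b c d) res d
          = res + (if !st then
              (if d == 0 then pvDpAP K tl 0 m false false
               else pvDpAP K tl d (PySem.Int.bor 1 ((1 : Int) <<< d.toNat)) false true)
            else
              (if PySem.Int.band m ((1 : Int) <<< (PySem.Int.mod (s + d) K).toNat) ≠ 0 then 0
               else pvDpAP K tl (PySem.Int.mod (s + d) K)
                 (PySem.Int.bor m ((1 : Int) <<< (PySem.Int.mod (s + d) K).toNat)) false true)) := by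
      intro res d hd
      have hlt : d < d0 := (PySem.List.mem_pyRange_one.mp hd).2
      have hne : (d == d0) = false := by simp; omega
      cases st with
      | false =>
        simp only [pvDpAStep, hne, Bool.and_false, Bool.not_false, if_true]
        split_ifs <;> simp
      | true =>
        simp only [pvDpAStep, hne, Bool.and_false, Bool.not_true, Bool.false_eq_true, if_false]
        split_ifs <;> simp
    rw [PySem.List.foldl_congr_mem _ _ _ _ hbody, pv_foldl_guard_sum, zero_add,
        List.foldl_cons, List.foldl_nil]
    have heqd0 : (d0 == d0) = true := by simp
    have hsum : ((PySem.List.pyRange 0 d0 1).map (fun d =>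
        if !st then
          (if d == 0 then pvDpAP K tl 0 m false false
           else pvDpAP K tl d (PySem.Int.bor 1 ((1 : Int) <<< d.toNat)) false true)
        else
          (if PySem.Int.band m ((1 : Int) <<< (PySem.Int.mod (s + d) K).toNat) ≠ 0 then 0
           else pvDpAP K tl (PySem.Int.mod (s + d) K)
             (PySem.Int.bor m ((1 : Int) <<< (PySem.Int.mod (s + d) K).toNat)) false true))).sum
      ≡ ((PySem.List.pyRange 0 d0 1).map (fun d =>
        if !st then
          (if d == 0 then pvCntZ K tl.length
           else pvCntF K tl.length d (PySem.Int.bor 1 ((1 : Int) <<< d.toNat)))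
        else
          if PySem.Int.band m ((1 : Int) <<< (PySem.Int.mod (s + d) K).toNat) ≠ 0 then 0
          else pvCntF K tl.length (PySem.Int.mod (s + d) K)
            (PySem.Int.bor m ((1 : Int) <<< (PySem.Int.mod (s + d) K).toNat)))).sum
        [ZMOD pvMOD] := by
      refine pv_sum_modeq _ _ _ ?_
      intro d _
      cases st with
      | false =>
        simp only [Bool.not_false, if_true]
        by_cases hdz : (d == 0) = true
        · rw [if_pos hdz, if_pos hdz, pv_dpAP_zero]; exact pv_modeq_mod _
        · rw [if_neg hdz, if_neg hdz, pv_dpAP_free]; exact pv_modeq_mod _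
      | true =>
        simp only [Bool.not_true, Bool.false_eq_true, if_false]
        by_cases hb : PySem.Int.band m ((1 : Int) <<< (PySem.Int.mod (s + d) K).toNat) ≠ 0
        · rw [if_pos hb, if_pos hb]
        · rw [if_neg hb, if_neg hb, pv_dpAP_free]; exact pv_modeq_mod _
    refine pv_mod_congr ?_
    rw [show pvCntT K (d0 :: tl) s m st
        = ((PySem.List.pyRange 0 d0 1).map (fun d =>
            if !st then
              (if d == 0 then pvCntZ K tl.length
               else pvCntF K tl.length d (PySem.Int.bor 1 ((1 : Int) <<< d.toNat)))
            else
              if PySem.Int.band m ((1 : Int) <<< (PySem.Int.mod (s + d) K).toNat) ≠ 0 then 0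
              else pvCntF K tl.length (PySem.Int.mod (s + d) K)
                (PySem.Int.bor m ((1 : Int) <<< (PySem.Int.mod (s + d) K).toNat)))).sum
          + (if !st then
              (if d0 != 0 then pvCntT K tl d0 (PySem.Int.bor 1 ((1 : Int) <<< d0.toNat)) true
               else pvCntT K tl 0 m false)
             else
              if PySem.Int.band m ((1 : Int) <<< (PySem.Int.mod (s + d0) K).toNat) ≠ 0 then 0
              else pvCntT K tl (PySem.Int.mod (s + d0) K)
                (PySem.Int.bor m ((1 : Int) <<< (PySem.Int.mod (s + d0) K).toNat)) true) from rfl]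
    cases st with
    | false =>
      simp only [pvDpAStep, heqd0, Bool.true_and, Bool.not_false, if_true]
      by_cases h0 : (d0 == 0) = true
      · have hd00 : d0 = 0 := by simpa using h0
        have hne0 : (d0 != 0) = false := by simp [hd00]
        rw [if_pos h0, hne0]
        simp only [Bool.false_eq_true, if_false]
        refine Int.ModEq.add hsum ?_
        rw [ihtl 0 m false]
        exact pv_modeq_mod _
      · have hne0 : (d0 != 0) = true := by simp_all
        rw [if_neg h0, hne0]
        simp only [if_true]
        refine Int.ModEq.add hsum ?_
        rw [ihtl]
        exact pv_modeq_mod _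
    | true =>
      simp only [pvDpAStep, heqd0, Bool.true_and, Bool.not_true, Bool.false_eq_true, if_false]
      by_cases hb : PySem.Int.band m ((1 : Int) <<< (PySem.Int.mod (s + d0) K).toNat) ≠ 0
      · rw [if_pos hb, if_pos hb, add_zero]
        exact hsum
      · rw [if_neg hb, if_neg hb]
        refine Int.ModEq.add hsum ?_
        rw [ihtl]
        exact pv_modeq_mod _

theorem pv_dfsAP_free (K : Int) : ∀ (r : Nat) (s m : Int),
    pvDfsAP K r s m false = PySem.Int.mod (pvCntF K r s m) pvMOD := by
  intro r
  induction r with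
  | zero =>
    intro s m
    simp [pvDfsAP, pvCntF, pvMOD]
  | succ r ih =>
    intro s m
    show PySem.Int.mod ((PySem.List.pyRange 0 10 1).foldl
      (pvDfsAStep K s m (fun a b => pvDfsAP K r a b false)) 0) pvMOD = _
    have hbody : ∀ (res d : Int),
        pvDfsAStep K s m (fun a b => pvDfsAP K r a b false) res d
          = res + (if PySem.Int.band m ((1 : Int) <<< (PySem.Int.mod (s + d) K).toNat) ≠ 0 then 0
              else pvDfsAP K r (PySem.Int.mod (s + d) K)
                (PySem.Int.bor m ((1 : Int) <<< (PySem.Int.mod (s + d) K).toNat)) false) := by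
      intro res d
      simp only [pvDfsAStep]
      split_ifs <;> simp
    rw [PySem.List.foldl_congr_mem _ _ _ _ (fun res d hd => hbody res d), pv_foldl_guard_sum, zero_add]
    refine pv_mod_congr ?_
    rw [pvCntF]
    refine pv_sum_modeq _ _ _ ?_
    intro d _
    by_cases hb : PySem.Int.band m ((1 : Int) <<< (PySem.Int.mod (s + d) K).toNat) ≠ 0
    · rw [if_pos hb, if_pos hb]
    · rw [if_neg hb, if_neg hb, ih]
      exact pv_modeq_mod _

theorem pv_band_one_shift (n : Nat) :
    PySem.Int.band 1 ((1 : Int) <<< n) = if n = 0 then 1 else 0 := by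
  cases n with
  | zero => decide
  | succ k =>
    simp only [Nat.succ_ne_zero, if_false]
    rw [PySem.Int.band_comm, PySem.Int.band_one]
    have h1 : ((1 : Int) <<< (k + 1)) = 2 ^ (k + 1) := by
      simp [Int.shiftLeft_eq]
    rw [h1, PySem.Int.mod_eq_emod_of_pos (by norm_num)]
    exact Int.emod_eq_zero_of_dvd (dvd_pow_self (2 : Int) (Nat.succ_ne_zero k))

-- count_fixed_length(length) computes the true fixed-length count mod pvMOD
theorem pv_cflA_eq (K : Int) (hK : 0 < K) (len : Int) (hlen : 1 ≤ len) :
    pvCflA K len = PySem.Int.mod (pvCntFix K (len.toNat - 1)) pvMOD := by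
  obtain ⟨r, hr⟩ : ∃ r, len.toNat = r + 1 := ⟨len.toNat - 1, by omega⟩
  rw [pvCflA, pvDfsA_eq, hr, show r + 1 - 1 = r from rfl]
  show PySem.Int.mod ((PySem.List.pyRange 1 10 1).foldl
    (pvDfsAStep K 0 1 (fun a b => pvDfsAP K r a b false)) 0) pvMOD = _
  have hbody : ∀ (res : Int), ∀ d ∈ PySem.List.pyRange 1 10 1,
      pvDfsAStep K 0 1 (fun a b => pvDfsAP K r a b false) res d
        = res + (if PySem.Int.band 1 ((1 : Int) <<< (PySem.Int.mod (0 + d) K).toNat) ≠ 0 then 0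
            else pvDfsAP K r (PySem.Int.mod (0 + d) K)
              (PySem.Int.bor 1 ((1 : Int) <<< (PySem.Int.mod (0 + d) K).toNat)) false) := by
    intro res d _
    simp only [pvDfsAStep]
    split_ifs <;> simp
  rw [PySem.List.foldl_congr_mem _ _ _ _ hbody, pv_foldl_guard_sum, zero_add]
  refine pv_mod_congr ?_
  rw [pvCntFix]
  refine pv_sum_modeq _ _ _ ?_
  intro d _
  rw [zero_add, pv_band_one_shift]
  have hnn : 0 ≤ PySem.Int.mod d K := by
    rw [PySem.Int.mod_eq_emod_of_pos hK]
    exact Int.emod_nonneg d (by omega)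
  by_cases hz : PySem.Int.mod d K = 0
  · have ht : (PySem.Int.mod d K).toNat = 0 := by omega
    rw [if_pos ht, if_pos (by norm_num : (1 : Int) ≠ 0), if_neg (by simpa using hz)]
  · have ht : (PySem.Int.mod d K).toNat ≠ 0 := by omega
    rw [if_neg ht, if_neg (by simp : ¬((0 : Int) ≠ 0)), if_pos hz, pv_dfsAP_free]
    exact pv_modeq_mod _

-- ===== B-side: the forward sweep computes the same true counts =====

-- the weighted total of a frontier: each state weighted by its completion count
def pvW (K : Int) (r : Nat) (F : pvFr) : Int :=
  (F.keys.map (fun k => F.getD k 0 * pvCntF K r k.1 k.2)).sum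

theorem pv_sum_map_single {α : Type} [DecidableEq α] (g g' : α → Int) (k : α) :
    ∀ (ks : List α), ks.Nodup → k ∈ ks → (∀ x ∈ ks, x ≠ k → g' x = g x) →
    (ks.map g').sum = (ks.map g).sum + (g' k - g k) := by
  intro ks
  induction ks with
  | nil => intro _ h; exact absurd h (by simp)
  | cons x ks ih =>
    intro hnd hk hoff
    simp only [List.map_cons, List.sum_cons]
    rcases List.mem_cons.mp hk with rfl | hk'
    · have : ∀ y ∈ ks, g' y = g y := by
        intro y hy
        exact hoff y (List.mem_cons_of_mem _ hy) (fun h => (List.nodup_cons.mp hnd).1 (h ▸ hy))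
      rw [List.map_congr_left this]
      ring
    · rw [hoff x (by simp) (fun h => (List.nodup_cons.mp hnd).1 (h ▸ hk')),
        ih (List.nodup_cons.mp hnd).2 hk' (fun y hy => hoff y (List.mem_cons_of_mem _ hy))]
      ring

-- adding c at key k raises the weighted total by c times the key's weight
theorem pv_W_insert (K : Int) (r : Nat) (F : pvFr) (hnd : F.keys.Nodup) (k : Int × Int) (c : Int) :
    pvW K r (F.insert k (F.getD k 0 + c)) = pvW K r F + c * pvCntF K r k.1 k.2 := by
  by_cases hc : F.contains k = true
  · have hkeys := PySem.Dict.keys_insert_of_contains F (F.getD k 0 + c) hc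
    have hmem : k ∈ F.keys := (PySem.Dict.contains_iff_mem_keys _ _).mp hc
    unfold pvW
    rw [hkeys]
    rw [pv_sum_map_single (fun x => F.getD x 0 * pvCntF K r x.1 x.2)
        (fun x => (F.insert k (F.getD k 0 + c)).getD x 0 * pvCntF K r x.1 x.2) k F.keys hnd hmem
        (fun x _ hx => by
          show (F.insert k (F.getD k 0 + c)).getD x 0 * pvCntF K r x.1 x.2
            = F.getD x 0 * pvCntF K r x.1 x.2
          rw [PySem.Dict.getD_insert _ _ _ _ _]; simp [hx])]
    rw [PySem.Dict.getD_insert _ _ _ _ _]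
    simp only [if_true]
    ring
  · have hc' : F.contains k = false := by simpa using hc
    have hkeys := PySem.Dict.keys_insert_of_not_contains F (F.getD k 0 + c) hc'
    unfold pvW
    rw [hkeys, List.map_append, List.sum_append]
    have h1 : ∀ x ∈ F.keys, (F.insert k (F.getD k 0 + c)).getD x 0 = F.getD x 0 := by
      intro x hx
      rw [PySem.Dict.getD_insert _ _ _ _ _]
      have : x ≠ k := fun h => by
        rw [h] at hx
        exact absurd ((PySem.Dict.contains_iff_mem_keys _ _).mpr hx) (by simp [hc'])
      simp [this]
    rw [List.map_congr_left (fun x hx => by rw [h1 x hx])]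
    have h2 : F.getD k 0 = 0 := PySem.Dict.getD_of_not_contains F 0 hc'
    simp only [List.map_cons, List.map_nil, List.sum_cons, List.sum_nil]
    rw [PySem.Dict.getD_insert _ _ _ _ _]
    simp only [if_true, h2]
    ring

-- a guarded loop of dictionary adds, as one weighted-sum update
theorem pv_W_foldl_adds {α : Type} (K : Int) (r : Nat) (l : List α)
    (key : α → Int × Int) (amt : α → Int) (cond : α → Bool) :
    ∀ (F : pvFr), F.keys.Nodup →
    (l.foldl (fun F a => if cond a then F
        else F.insert (key a) (F.getD (key a) 0 + amt a)) F).keys.Nodup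
    ∧ pvW K r (l.foldl (fun F a => if cond a then F
        else F.insert (key a) (F.getD (key a) 0 + amt a)) F)
      = pvW K r F + (l.map (fun a => if cond a then 0
          else amt a * pvCntF K r (key a).1 (key a).2)).sum := by
  induction l with
  | nil => intro F hnd; exact ⟨hnd, by simp⟩
  | cons a l ih =>
    intro F hnd
    simp only [List.foldl_cons, List.map_cons, List.sum_cons]
    by_cases hc : cond a = true
    · simp only [hc, if_true]
      obtain ⟨h1, h2⟩ := ih F hnd
      exact ⟨h1, by rw [h2]; ring⟩
    · simp only [hc, Bool.false_eq_true, if_false]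
      have hnd' : (F.insert (key a) (F.getD (key a) 0 + amt a)).keys.Nodup :=
        PySem.Dict.nodup_keys_insert _ _ _ hnd
      obtain ⟨h1, h2⟩ := ih _ hnd'
      refine ⟨h1, ?_⟩
      rw [h2, pv_W_insert K r F hnd]
      ring

-- stepping the frontier advances every weight by one position
theorem pv_step_W (K : Int) (r : Nat) (F : pvFr) (hnd : F.keys.Nodup) :
    (pvStepB K F).keys.Nodup ∧ pvW K r (pvStepB K F) = pvW K (r + 1) F := by
  have hitems : ∀ (l : List ((Int × Int) × Int)) (NF : pvFr), NF.keys.Nodup →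
      (l.foldl (fun NF p =>
        (PySem.List.pyRange 0 10 1).foldl (fun NF d =>
          let ns := PySem.Int.mod (p.1.1 + d) K
          let b := (1 : Int) <<< ns.toNat
          if PySem.Int.band p.1.2 b ≠ 0 then NF
          else
            let key := (ns, PySem.Int.bor p.1.2 b)
            NF.insert key (NF.getD key 0 + p.2)) NF) NF).keys.Nodup
      ∧ pvW K r (l.foldl (fun NF p =>
        (PySem.List.pyRange 0 10 1).foldl (fun NF d =>
          let ns := PySem.Int.mod (p.1.1 + d) K
          let b := (1 : Int) <<< ns.toNat
          if PySem.Int.band p.1.2 b ≠ 0 then NF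
          else
            let key := (ns, PySem.Int.bor p.1.2 b)
            NF.insert key (NF.getD key 0 + p.2)) NF) NF)
         = pvW K r NF + (l.map (fun p => p.2 * pvCntF K (r + 1) p.1.1 p.1.2)).sum := by
    intro l
    induction l with
    | nil => intro NF hnd; exact ⟨hnd, by simp⟩
    | cons p l ih =>
      intro NF hnd
      simp only [List.foldl_cons, List.map_cons, List.sum_cons]
      obtain ⟨h1, h2⟩ := pv_W_foldl_adds K r (PySem.List.pyRange 0 10 1)
        (fun d => (PySem.Int.mod (p.1.1 + d) K,
          PySem.Int.bor p.1.2 ((1 : Int) <<< (PySem.Int.mod (p.1.1 + d) K).toNat)))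
        (fun _ => p.2)
        (fun d => decide (PySem.Int.band p.1.2 ((1 : Int) <<< (PySem.Int.mod (p.1.1 + d) K).toNat) ≠ 0))
        NF hnd
      have hshape : (PySem.List.pyRange 0 10 1).foldl (fun NF d =>
          let ns := PySem.Int.mod (p.1.1 + d) K
          let b := (1 : Int) <<< ns.toNat
          if PySem.Int.band p.1.2 b ≠ 0 then NF
          else
            let key := (ns, PySem.Int.bor p.1.2 b)
            NF.insert key (NF.getD key 0 + p.2)) NF
        = (PySem.List.pyRange 0 10 1).foldl (fun NF d =>
          if (decide (PySem.Int.band p.1.2 ((1 : Int) <<< (PySem.Int.mod (p.1.1 + d) K).toNat) ≠ 0)) then NF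
          else NF.insert (PySem.Int.mod (p.1.1 + d) K,
              PySem.Int.bor p.1.2 ((1 : Int) <<< (PySem.Int.mod (p.1.1 + d) K).toNat))
            (NF.getD (PySem.Int.mod (p.1.1 + d) K,
              PySem.Int.bor p.1.2 ((1 : Int) <<< (PySem.Int.mod (p.1.1 + d) K).toNat)) 0 + p.2)) NF := by
        apply PySem.List.foldl_congr_mem
        intro NF' d _
        by_cases hb : PySem.Int.band p.1.2 ((1 : Int) <<< (PySem.Int.mod (p.1.1 + d) K).toNat) ≠ 0
          <;> simp [hb]
      rw [hshape]
      obtain ⟨h3, h4⟩ := ih _ h1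
      refine ⟨h3, ?_⟩
      rw [h4, h2]
      have hsum : ((PySem.List.pyRange 0 10 1).map (fun d =>
          if (decide (PySem.Int.band p.1.2 ((1 : Int) <<< (PySem.Int.mod (p.1.1 + d) K).toNat) ≠ 0)) then 0
          else p.2 * pvCntF K r (PySem.Int.mod (p.1.1 + d) K)
            (PySem.Int.bor p.1.2 ((1 : Int) <<< (PySem.Int.mod (p.1.1 + d) K).toNat)))).sum
          = p.2 * pvCntF K (r + 1) p.1.1 p.1.2 := by
        rw [show pvCntF K (r + 1) p.1.1 p.1.2 = ((PySem.List.pyRange 0 10 1).map (fun d =>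
            let ns := PySem.Int.mod (p.1.1 + d) K
            if PySem.Int.band p.1.2 ((1 : Int) <<< ns.toNat) ≠ 0 then 0
            else pvCntF K r ns (PySem.Int.bor p.1.2 ((1 : Int) <<< ns.toNat)))).sum from rfl,
          ← List.sum_map_mul_left]
        congr 1
        apply List.map_congr_left
        intro d _
        by_cases hb : PySem.Int.band p.1.2 ((1 : Int) <<< (PySem.Int.mod (p.1.1 + d) K).toNat) ≠ 0
          <;> simp [hb]
      rw [hsum]
      ring
  have h0 : (PySem.Dict.empty : pvFr).keys.Nodup := by
    simpa using PySem.Dict.nodup_keys_empty (κ := Int × Int) (ν := Int)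
  obtain ⟨h1, h2⟩ := hitems F.items PySem.Dict.empty h0
  refine ⟨h1, ?_⟩
  show pvW K r (pvStepB K F) = _
  rw [show pvStepB K F = F.items.foldl _ PySem.Dict.empty from rfl, h2]
  have hW0 : pvW K r (PySem.Dict.empty : pvFr) = 0 := by
    simp [pvW, PySem.Dict.keys_empty]
  rw [hW0, zero_add]
  unfold pvW
  rw [PySem.Dict.items_eq_map_keys F hnd 0, List.map_map]
  rfl

-- the frontier at the end of a sweep totals its weighted states
theorem pv_values_sum (F : pvFr) (hnd : F.keys.Nodup) (K : Int) :
    F.values.sum = pvW K 0 F := by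
  rw [PySem.Dict.values_eq_map_keys F hnd 0]
  unfold pvW
  congr 1
  apply List.map_congr_left
  intro k _
  show F.getD k 0 = F.getD k 0 * pvCntF K 0 k.1 k.2
  rw [show pvCntF K 0 k.1 k.2 = 1 from rfl, mul_one]

theorem pv_cntT_dead (K : Int) : ∀ (tl : List Int) (s m s' m' : Int),
    pvCntT K tl s m false = pvCntT K tl s' m' false := by
  intro tl
  induction tl with
  | nil => intro _ _ _ _; rfl
  | cons d0 tl ih =>
    intro s m s' m'
    rw [pvCntT, pvCntT]
    simp only [Bool.not_false, if_true]
    by_cases h : (d0 != 0) = true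
    · simp [h]
    · have h0 : (d0 != 0) = false := by simpa using h
      simp only [h0, Bool.false_eq_true, if_false]
      rw [ih 0 m 0 m']

-- the tight-branch loop, as one potential update
theorem pv_tight_fold (K ts tm : Int) (tst : Bool) (r : Nat) (l : List Int) :
    ∀ (F : pvFr) (Z : Int), F.keys.Nodup →
    ((l.foldl (pvTightBranchB K ts tm tst) (F, Z)).1.keys.Nodup
    ∧ pvW K r (l.foldl (pvTightBranchB K ts tm tst) (F, Z)).1
        + (l.foldl (pvTightBranchB K ts tm tst) (F, Z)).2 * pvCntZ K r
      = pvW K r F + Z * pvCntZ K r + (l.map (fun d =>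
          if !tst then
            (if d == 0 then pvCntZ K r
             else pvCntF K r d (PySem.Int.bor 1 ((1 : Int) <<< d.toNat)))
          else
            if PySem.Int.band tm ((1 : Int) <<< (PySem.Int.mod (ts + d) K).toNat) ≠ 0 then 0
            else pvCntF K r (PySem.Int.mod (ts + d) K)
              (PySem.Int.bor tm ((1 : Int) <<< (PySem.Int.mod (ts + d) K).toNat)))).sum) := by
  induction l with
  | nil => intro F Z hnd; exact ⟨hnd, by simp⟩
  | cons d l ih =>
    intro F Z hnd
    simp only [List.foldl_cons, List.map_cons, List.sum_cons]
    cases tst with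
    | false =>
      by_cases hd : (d == 0) = true
      · have hstep : pvTightBranchB K ts tm false (F, Z) d = (F, Z + 1) := by
          simp [pvTightBranchB, hd]
        rw [hstep]
        obtain ⟨h1, h2⟩ := ih F (Z + 1) hnd
        refine ⟨h1, ?_⟩
        rw [h2]
        simp only [Bool.not_false, if_true, hd]
        ring
      · have hd' : (d == 0) = false := by simpa using hd
        have hstep : pvTightBranchB K ts tm false (F, Z) d
            = (F.insert (d, PySem.Int.bor 1 ((1 : Int) <<< d.toNat))
                (F.getD (d, PySem.Int.bor 1 ((1 : Int) <<< d.toNat)) 0 + 1), Z) := by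
          simp [pvTightBranchB, hd']
        rw [hstep]
        obtain ⟨h1, h2⟩ := ih _ Z (PySem.Dict.nodup_keys_insert _ _ _ hnd)
        refine ⟨h1, ?_⟩
        rw [h2, pv_W_insert K r F hnd]
        simp only [Bool.not_false, if_true, hd', Bool.false_eq_true, if_false]
        ring
    | true =>
      by_cases hb : PySem.Int.band tm ((1 : Int) <<< (PySem.Int.mod (ts + d) K).toNat) ≠ 0
      · have hstep : pvTightBranchB K ts tm true (F, Z) d = (F, Z) := by
          simp only [pvTightBranchB, Bool.not_true, Bool.false_eq_true, if_false]
          rw [if_pos hb]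
        rw [hstep]
        obtain ⟨h1, h2⟩ := ih F Z hnd
        refine ⟨h1, ?_⟩
        rw [h2]
        simp only [Bool.not_true, Bool.false_eq_true, if_false]
        rw [if_pos hb]
        ring
      · have hstep : pvTightBranchB K ts tm true (F, Z) d
            = (F.insert (PySem.Int.mod (ts + d) K,
                  PySem.Int.bor tm ((1 : Int) <<< (PySem.Int.mod (ts + d) K).toNat))
                (F.getD (PySem.Int.mod (ts + d) K,
                  PySem.Int.bor tm ((1 : Int) <<< (PySem.Int.mod (ts + d) K).toNat)) 0 + 1), Z) := by
          simp only [pvTightBranchB, Bool.not_true, Bool.false_eq_true, if_false]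
          rw [if_neg hb]
        rw [hstep]
        obtain ⟨h1, h2⟩ := ih _ Z (PySem.Dict.nodup_keys_insert _ _ _ hnd)
        refine ⟨h1, ?_⟩
        rw [h2, pv_W_insert K r F hnd]
        simp only [Bool.not_true, Bool.false_eq_true, if_false]
        rw [if_neg hb]
        ring

-- an unguarded loop of dictionary adds
theorem pv_W_foldl_adds' {α : Type} (K : Int) (r : Nat) (l : List α)
    (key : α → Int × Int) (amt : α → Int) :
    ∀ (F : pvFr), F.keys.Nodup →
    (l.foldl (fun F a => F.insert (key a) (F.getD (key a) 0 + amt a)) F).keys.Nodup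
    ∧ pvW K r (l.foldl (fun F a => F.insert (key a) (F.getD (key a) 0 + amt a)) F)
      = pvW K r F + (l.map (fun a => amt a * pvCntF K r (key a).1 (key a).2)).sum := by
  induction l with
  | nil => intro F hnd; exact ⟨hnd, by simp⟩
  | cons a l ih =>
    intro F hnd
    simp only [List.foldl_cons, List.map_cons, List.sum_cons]
    obtain ⟨h1, h2⟩ := ih _ (PySem.Dict.nodup_keys_insert _ _ _ hnd)
    refine ⟨h1, ?_⟩
    rw [h2, pv_W_insert K r F hnd]
    ring

-- one full sweep position, then the whole sweep, as the tight ghost count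
set_option maxHeartbeats 1000000 in
theorem pv_sweep_fold (K : Int) : ∀ (l : List Int), (∀ d ∈ l, 0 ≤ d) →
    ∀ (F : pvFr) (Z : Int) (alive : Bool) (ts tm : Int) (tst : Bool), F.keys.Nodup →
    (l.foldl (pvSweepBodyB K) (F, Z, alive, ts, tm, tst)).1.values.sum
      + (if (l.foldl (pvSweepBodyB K) (F, Z, alive, ts, tm, tst)).2.2.1
           && (l.foldl (pvSweepBodyB K) (F, Z, alive, ts, tm, tst)).2.2.2.2.2 then 1 else 0)
      = pvW K l.length F + Z * pvCntZ K l.length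
        + (if alive then pvCntT K l ts tm tst else 0) := by
  intro l
  induction l with
  | nil =>
    intro _ F Z alive ts tm tst hnd
    simp only [List.foldl_nil, List.length_nil]
    rw [pv_values_sum F hnd K]
    rw [show pvCntZ K 0 = 0 from rfl, mul_zero, add_zero]
    congr 1
    cases alive <;> cases tst <;> simp [pvCntT]
  | cons d0 l ihl =>
    intro hnn F Z alive ts tm tst hnd
    have hd0 : (0 : Int) ≤ d0 := hnn d0 (by simp)
    have hnn' : ∀ d ∈ l, 0 ≤ d := fun d hd => hnn d (List.mem_cons_of_mem _ hd)
    obtain ⟨hnd1, hW1⟩ := pv_step_W K l.length F hnd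
    obtain ⟨hnd2, hW2⟩ := pv_W_foldl_adds' K l.length (PySem.List.pyRange 1 10 1)
      (fun d => (d, PySem.Int.bor 1 ((1 : Int) <<< d.toNat))) (fun _ => Z) (pvStepB K F) hnd1
    set F2 := (PySem.List.pyRange 1 10 1).foldl (fun F d =>
        F.insert (d, PySem.Int.bor 1 ((1 : Int) <<< d.toNat))
          (F.getD (d, PySem.Int.bor 1 ((1 : Int) <<< d.toNat)) 0 + Z)) (pvStepB K F) with hF2
    have hW2' : pvW K l.length F2 = pvW K (l.length + 1) F
        + Z * ((PySem.List.pyRange 1 10 1).map (fun d =>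
            pvCntF K l.length d (PySem.Int.bor 1 ((1 : Int) <<< d.toNat)))).sum := by
      rw [hF2, hW2, hW1, List.sum_map_mul_left]
    have hcz : pvCntZ K (l.length + 1) = pvCntZ K l.length
        + ((PySem.List.pyRange 1 10 1).map (fun d =>
            pvCntF K l.length d (PySem.Int.bor 1 ((1 : Int) <<< d.toNat)))).sum := rfl
    simp only [List.foldl_cons, List.length_cons]
    cases alive with
    | false =>
      have hstep : pvSweepBodyB K (F, Z, false, ts, tm, tst) d0 = (F2, Z, false, ts, tm, tst) := by
        simp only [pvSweepBodyB, Bool.false_eq_true, if_false]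
        rfl
      simp only [hstep]
      rw [ihl hnn' F2 Z false ts tm tst hnd2]
      simp only [Bool.false_eq_true, if_false, add_zero]
      rw [hW2', hcz]
      ring
    | true =>
      obtain ⟨hndT, hWT⟩ := pv_tight_fold K ts tm tst l.length (PySem.List.pyRange 0 d0 1) F2 Z hnd2
      set FZ := (PySem.List.pyRange 0 d0 1).foldl (pvTightBranchB K ts tm tst) (F2, Z) with hFZ
      have hcntT : pvCntT K (d0 :: l) ts tm tst
          = ((PySem.List.pyRange 0 d0 1).map (fun d =>
              if !tst then
                (if d == 0 then pvCntZ K l.length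
                 else pvCntF K l.length d (PySem.Int.bor 1 ((1 : Int) <<< d.toNat)))
              else
                if PySem.Int.band tm ((1 : Int) <<< (PySem.Int.mod (ts + d) K).toNat) ≠ 0 then 0
                else pvCntF K l.length (PySem.Int.mod (ts + d) K)
                  (PySem.Int.bor tm ((1 : Int) <<< (PySem.Int.mod (ts + d) K).toNat)))).sum
            + (if !tst then
                (if d0 != 0 then pvCntT K l d0 (PySem.Int.bor 1 ((1 : Int) <<< d0.toNat)) true
                 else pvCntT K l 0 tm false)
               else
                if PySem.Int.band tm ((1 : Int) <<< (PySem.Int.mod (ts + d0) K).toNat) ≠ 0 then 0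
                else pvCntT K l (PySem.Int.mod (ts + d0) K)
                  (PySem.Int.bor tm ((1 : Int) <<< (PySem.Int.mod (ts + d0) K).toNat)) true) := rfl
    -- case split on the tight advance
      cases tst with
      | false =>
        by_cases h0 : (d0 != 0) = true
        · have hstep : pvSweepBodyB K (F, Z, true, ts, tm, false) d0
              = (FZ.1, FZ.2, true, d0, PySem.Int.bor 1 ((1 : Int) <<< d0.toNat), true) := by
            simp only [pvSweepBodyB, if_true, Bool.not_false, h0]
            rfl
          simp only [hstep]
          rw [ihl hnn' FZ.1 FZ.2 true d0 _ true hndT, hcntT]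
          simp only [Bool.not_false, if_true, h0]
          simp only [Bool.not_false, if_true] at hWT
          rw [hW2'] at hWT
          rw [hcz]
          linarith [hWT]
        · have h0' : (d0 != 0) = false := by simpa using h0
          have hstep : pvSweepBodyB K (F, Z, true, ts, tm, false) d0
              = (FZ.1, FZ.2, true, ts, tm, false) := by
            simp only [pvSweepBodyB, if_true, Bool.not_false, h0', Bool.false_eq_true, if_false]
            rfl
          simp only [hstep]
          rw [ihl hnn' FZ.1 FZ.2 true ts tm false hndT, hcntT]
          simp only [Bool.not_false, if_true, h0', Bool.false_eq_true, if_false]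
          rw [pv_cntT_dead K l ts tm 0 tm]
          simp only [Bool.not_false, if_true] at hWT
          rw [hW2'] at hWT
          rw [hcz]
          linarith [hWT]
      | true =>
        by_cases hb : PySem.Int.band tm ((1 : Int) <<< (PySem.Int.mod (ts + d0) K).toNat) ≠ 0
        · have hstep : pvSweepBodyB K (F, Z, true, ts, tm, true) d0
              = (FZ.1, FZ.2, false, ts, tm, true) := by
            simp only [pvSweepBodyB, if_true, Bool.not_true, Bool.false_eq_true, if_false]
            rw [if_pos hb]
            rfl
          simp only [hstep]
          rw [ihl hnn' FZ.1 FZ.2 false ts tm true hndT, hcntT]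
          simp only [Bool.not_true, Bool.false_eq_true, if_false, if_true]
          rw [if_pos hb]
          simp only [Bool.not_true, Bool.false_eq_true, if_false] at hWT
          rw [hW2'] at hWT
          rw [hcz]
          linarith [hWT]
        · have hstep : pvSweepBodyB K (F, Z, true, ts, tm, true) d0
              = (FZ.1, FZ.2, true, PySem.Int.mod (ts + d0) K,
                  PySem.Int.bor tm ((1 : Int) <<< (PySem.Int.mod (ts + d0) K).toNat), true) := by
            simp only [pvSweepBodyB, if_true, Bool.not_true, Bool.false_eq_true, if_false]
            rw [if_neg hb]
            rfl
          simp only [hstep]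
          rw [ihl hnn' FZ.1 FZ.2 true _ _ true hndT, hcntT]
          simp only [Bool.not_true, Bool.false_eq_true, if_false, if_true]
          rw [if_neg hb]
          simp only [Bool.not_true, Bool.false_eq_true, if_false] at hWT
          rw [hW2'] at hWT
          rw [hcz]
          linarith [hWT]

theorem pv_digits_nonneg (limit : Int) : ∀ d ∈ pvDigits limit, 0 ≤ d := by
  intro d hd
  simp only [pvDigits, List.mem_map] at hd
  obtain ⟨c, _, rfl⟩ := hd
  exact Int.natCast_nonneg _

-- the whole n < K sweep
theorem pv_sweep_eq (K : Int) (digits : List Int) (hnn : ∀ d ∈ digits, 0 ≤ d) :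
    pvSweepB K digits = PySem.Int.mod (pvCntT K digits 0 1 false) pvMOD := by
  rw [pvSweepB]
  have h0 : (PySem.Dict.empty : pvFr).keys.Nodup := by
    simpa using PySem.Dict.nodup_keys_empty (κ := Int × Int) (ν := Int)
  have h := pv_sweep_fold K digits hnn PySem.Dict.empty 0 true 0 1 false h0
  rw [h]
  have hW0 : pvW K digits.length (PySem.Dict.empty : pvFr) = 0 := by
    simp [pvW, PySem.Dict.keys_empty]
  rw [hW0]
  norm_num

-- the seed loop of the fixed-length sweep builds the length-one frontier
theorem pv_seed_W (K : Int) (r : Nat) :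
    ((PySem.List.pyRange 1 10 1).foldl (fun F d =>
        if PySem.Int.mod d K ≠ 0 then
          F.insert (PySem.Int.mod d K,
              PySem.Int.bor 1 ((1 : Int) <<< (PySem.Int.mod d K).toNat))
            (F.getD (PySem.Int.mod d K,
              PySem.Int.bor 1 ((1 : Int) <<< (PySem.Int.mod d K).toNat)) 0 + 1)
        else F) (PySem.Dict.empty : pvFr)).keys.Nodup
    ∧ pvW K r ((PySem.List.pyRange 1 10 1).foldl (fun F d =>
        if PySem.Int.mod d K ≠ 0 then
          F.insert (PySem.Int.mod d K,
              PySem.Int.bor 1 ((1 : Int) <<< (PySem.Int.mod d K).toNat))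
            (F.getD (PySem.Int.mod d K,
              PySem.Int.bor 1 ((1 : Int) <<< (PySem.Int.mod d K).toNat)) 0 + 1)
        else F) (PySem.Dict.empty : pvFr))
      = pvCntFix K r := by
  have h0 : (PySem.Dict.empty : pvFr).keys.Nodup := by
    simpa using PySem.Dict.nodup_keys_empty (κ := Int × Int) (ν := Int)
  have hshape : (PySem.List.pyRange 1 10 1).foldl (fun (F : pvFr) d =>
        if PySem.Int.mod d K ≠ 0 then
          F.insert (PySem.Int.mod d K,
              PySem.Int.bor 1 ((1 : Int) <<< (PySem.Int.mod d K).toNat))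
            (F.getD (PySem.Int.mod d K,
              PySem.Int.bor 1 ((1 : Int) <<< (PySem.Int.mod d K).toNat)) 0 + 1)
        else F) (PySem.Dict.empty : pvFr)
      = (PySem.List.pyRange 1 10 1).foldl (fun (F : pvFr) d =>
        if (decide (PySem.Int.mod d K = 0)) then F
        else F.insert (PySem.Int.mod d K,
              PySem.Int.bor 1 ((1 : Int) <<< (PySem.Int.mod d K).toNat))
            (F.getD (PySem.Int.mod d K,
              PySem.Int.bor 1 ((1 : Int) <<< (PySem.Int.mod d K).toNat)) 0 + 1)) PySem.Dict.empty := by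
    apply PySem.List.foldl_congr_mem
    intro F d _
    by_cases hz : PySem.Int.mod d K = 0 <;> simp [hz]
  rw [hshape]
  obtain ⟨h1, h2⟩ := pv_W_foldl_adds K r (PySem.List.pyRange 1 10 1)
    (fun d => (PySem.Int.mod d K, PySem.Int.bor 1 ((1 : Int) <<< (PySem.Int.mod d K).toNat)))
    (fun _ => 1) (fun d => decide (PySem.Int.mod d K = 0)) PySem.Dict.empty h0
  refine ⟨h1, ?_⟩
  rw [h2]
  have hW0 : pvW K r (PySem.Dict.empty : pvFr) = 0 := by
    simp [pvW, PySem.Dict.keys_empty]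
  rw [hW0, zero_add, pvCntFix]
  apply congrArg
  apply List.map_congr_left
  intro d _
  by_cases hz : PySem.Int.mod d K = 0 <;> simp [hz]

-- the fixed-length sweep after its first (seeding) iteration
theorem pv_fixfold (K : Int) : ∀ (l : List Int), (∀ x ∈ l, (x == 1) = false) →
    ∀ (total : Int) (F : pvFr) (j : Nat), F.keys.Nodup →
    (∀ r, pvW K r F = pvCntFix K (j + r)) →
    (l.foldl (pvFixBodyB K) (total, F)).1
      = total + ((List.range l.length).map (fun t => pvCntFix K (j + 1 + t))).sum := by
  intro l
  induction l with
  | nil => intro _ total F j _ _; simp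
  | cons x l ih =>
    intro hne total F j hnd hW
    have hx : (x == 1) = false := hne x (by simp)
    have hne' : ∀ y ∈ l, (y == 1) = false := fun y hy => hne y (List.mem_cons_of_mem _ hy)
    have hstep : pvFixBodyB K (total, F) x = (total + (pvStepB K F).values.sum, pvStepB K F) := by
      simp only [pvFixBodyB, hx, Bool.false_eq_true, if_false]
    obtain ⟨hndS, _⟩ := pv_step_W K 0 F hnd
    have hWS : ∀ r, pvW K r (pvStepB K F) = pvCntFix K ((j + 1) + r) := by
      intro r
      rw [(pv_step_W K r F hnd).2, hW (r + 1)]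
      congr 1
      omega
    have hsum : (pvStepB K F).values.sum = pvCntFix K (j + 1) := by
      rw [pv_values_sum _ hndS K, hWS 0]
    simp only [List.foldl_cons, hstep, List.length_cons]
    rw [ih hne' (total + (pvStepB K F).values.sum) (pvStepB K F) (j + 1) hndS hWS, hsum]
    rw [List.range_succ_eq_map, List.map_cons, List.map_map, List.sum_cons]
    have hmap : ((List.range l.length).map ((fun t => pvCntFix K (j + 1 + t)) ∘ Nat.succ))
        = (List.range l.length).map (fun t => pvCntFix K (j + 1 + 1 + t)) := by
      apply List.map_congr_left
      intro t _
      simp only [Function.comp_apply]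
      congr 1
      omega
    rw [hmap]
    ring_nf

-- index shift between a pyRange sum and a List.range sum
theorem pv_pyRange_sum_shift (g : Int → Int) (a : Int) : ∀ n : Nat,
    ((PySem.List.pyRange a (a + (n : Int)) 1).map g).sum
      = ((List.range n).map (fun (t : Nat) => g (a + (t : Int)))).sum := by
  intro n
  induction n with
  | zero =>
    rw [show a + ((0 : Nat) : Int) = a from by push_cast; ring,
      PySem.List.pyRange_one_eq_nil le_rfl]
    simp
  | succ n ih =>
    rw [show a + ((n + 1 : Nat) : Int) = (a + (n : Int)) + 1 from by push_cast; ring,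
      PySem.List.pyRange_one_succ_right (by omega), List.range_succ,
      List.map_append, List.map_append, List.sum_append, List.sum_append, ih]
    simp

-- the fixed-length branch: A's per-length loop equals B's single sweep
theorem pv_fix_eq (K : Int) : pvCflUpToA K (K - 1) = pvFixedSweepB K := by
  rw [pvCflUpToA, show K - 1 + 1 = K from by ring, min_self, pvFixedSweepB]
  by_cases hK2 : K ≤ 1
  · rw [PySem.List.pyRange_one_eq_nil hK2]
    simp only [List.foldl_nil]
    rw [pv_mod_emod]
    norm_num
  · have hK1 : (1 : Int) < K := by omega
    have hK0 : (0 : Int) < K := by omega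
    -- A side: one mod of the sum of the true per-length counts
    have hA : (PySem.List.pyRange 1 K 1).foldl
        (fun total len => PySem.Int.mod (total + pvCflA K len) pvMOD) 0
        = PySem.Int.mod (((PySem.List.pyRange 1 K 1).map
            (fun len => pvCntFix K (len.toNat - 1))).sum) pvMOD := by
      rw [show (0 : Int) = PySem.Int.mod 0 pvMOD from by rw [pv_mod_emod]; norm_num,
        pv_modfold, zero_add]
      refine pv_mod_congr ?_
      refine pv_sum_modeq _ _ _ ?_
      intro len hlen
      have h1 : (1 : Int) ≤ len := (PySem.List.mem_pyRange_one.mp hlen).1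
      rw [pv_cflA_eq K hK0 len h1]
      exact pv_modeq_mod _
    rw [hA]
    -- B side: seed then sweep
    rw [PySem.List.pyRange_one_cons hK1, List.foldl_cons]
    have hseed := pv_seed_W K
    have hbody1 : pvFixBodyB K (0, PySem.Dict.empty) 1
        = (0 + ((PySem.List.pyRange 1 10 1).foldl (fun (F : pvFr) d =>
            if PySem.Int.mod d K ≠ 0 then
              F.insert (PySem.Int.mod d K,
                  PySem.Int.bor 1 ((1 : Int) <<< (PySem.Int.mod d K).toNat))
                (F.getD (PySem.Int.mod d K,
                  PySem.Int.bor 1 ((1 : Int) <<< (PySem.Int.mod d K).toNat)) 0 + 1)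
            else F) PySem.Dict.empty).values.sum,
          (PySem.List.pyRange 1 10 1).foldl (fun (F : pvFr) d =>
            if PySem.Int.mod d K ≠ 0 then
              F.insert (PySem.Int.mod d K,
                  PySem.Int.bor 1 ((1 : Int) <<< (PySem.Int.mod d K).toNat))
                (F.getD (PySem.Int.mod d K,
                  PySem.Int.bor 1 ((1 : Int) <<< (PySem.Int.mod d K).toNat)) 0 + 1)
            else F) PySem.Dict.empty) := by
      simp only [pvFixBodyB, BEq.rfl, if_true]
    rw [hbody1]
    have hvals : ((PySem.List.pyRange 1 10 1).foldl (fun (F : pvFr) d =>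
            if PySem.Int.mod d K ≠ 0 then
              F.insert (PySem.Int.mod d K,
                  PySem.Int.bor 1 ((1 : Int) <<< (PySem.Int.mod d K).toNat))
                (F.getD (PySem.Int.mod d K,
                  PySem.Int.bor 1 ((1 : Int) <<< (PySem.Int.mod d K).toNat)) 0 + 1)
            else F) PySem.Dict.empty).values.sum = pvCntFix K 0 := by
      rw [pv_values_sum _ (hseed 0).1 K]
      exact (hseed 0).2
    have hne2 : ∀ x ∈ PySem.List.pyRange 2 K 1, (x == 1) = false := by
      intro x hx
      have := (PySem.List.mem_pyRange_one.mp hx).1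
      simp only [beq_eq_false_iff_ne, ne_eq]
      omega
    rw [show ((1 : Int) + 1) = 2 from by norm_num]
    rw [pv_fixfold K (PySem.List.pyRange 2 K 1) hne2 _ _ 0 (hseed 0).1 (fun r => by rw [Nat.zero_add]; exact (hseed r).2)]
    rw [hvals]
    have hKsplit : K = 2 + ((K - 2).toNat : Int) := by omega
    have hlen2 : (PySem.List.pyRange 2 K 1).length = (K - 2).toNat := by
      rw [PySem.List.length_pyRange_one]
    rw [List.map_cons, List.sum_cons, hlen2, zero_add]
    have htail : ((PySem.List.pyRange 2 K 1).map (fun len => pvCntFix K (len.toNat - 1))).sum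
        = ((List.range (K - 2).toNat).map (fun (t : Nat) => pvCntFix K (0 + 1 + t))).sum := by
      rw [show PySem.List.pyRange 2 K 1
          = PySem.List.pyRange 2 (2 + (((K - 2).toNat : Nat) : Int)) 1 from by rw [← hKsplit],
        pv_pyRange_sum_shift (fun len => pvCntFix K (len.toNat - 1)) 2 ((K - 2).toNat)]
      apply congrArg
      apply List.map_congr_left
      intro t _
      congr 1
      omega
    rw [show (((1 : Int).toNat - 1) : Nat) = 0 from rfl, htail]

theorem pv_nonweak_eq (K limit : Int) : pvNonWeakA K limit = pvNonWeakB K limit := by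
  simp only [pvNonWeakA, pvNonWeakB]
  split_ifs with h1 h2
  · rfl
  · exact pv_fix_eq K
  · rw [pvDpA_eq, pv_dpAP_tight K (pvDigits limit) (pv_digits_nonneg limit) 0 1 false,
      pv_sweep_eq K (pvDigits limit) (pv_digits_nonneg limit)]

theorem pv_count_eq (L R K : Int) : count_k_weak L R K = count_k_weak_alt L R K := by
  simp only [count_k_weak, count_k_weak_alt, pv_nonweak_eq]

-- ===== VERDICT (by name: the statement is the Claim_ definition above) =====
theorem count_k_weak_spec : Claim_equal_count_k_weak := by
  intro L R K _
  exact pv_count_eq L R K
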